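-- pv_equiv track=rewrite | github.com/DiegoMao201/Servicio-Al-Cliente-FERREINOX-SAS-BIC | backend/agent_v3.py | _classify_return_intent
-- ===== SOURCE A (Python) =====
-- def _classify_return_intent(tool_calls_made: list, user_message: str, m) -> str:
--     """Clasifica el intent basado en herramientas llamadas (para retorno)."""
--     intent = "consulta_general"
--     for tc in tool_calls_made:
--         name = tc["name"]
--         if name == "verificar_identidad":
--             intent = "verificacion_identidad"
--         elif name in ("consultar_inventario", "consultar_inventario_lote"):
--             intent = "consulta_productos"
--         elif name == "consultar_cartera":
--             intent = "consulta_cartera"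
--         elif name == "consultar_compras":
--             intent = "consulta_compras"
--         elif name == "consultar_ventas_internas":
--             intent = "consulta_ventas_internas"
--         elif name == "buscar_documento_tecnico":
--             intent = "consulta_documentacion"
--         elif name == "consultar_conocimiento_tecnico":
--             intent = "asesoria_tecnica"
--         elif name == "radicar_reclamo":
--             intent = "reclamo_servicio"
--         elif name == "confirmar_pedido_y_generar_pdf":
--             intent = "pedido"
--     return intent
-- ===== SOURCE B (Python) =====
-- _INTENT_BY_TOOL = {
--     "verificar_identidad": "verificacion_identidad",
--     "consultar_inventario": "consulta_productos",
--     "consultar_inventario_lote": "consulta_productos",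
--     "consultar_cartera": "consulta_cartera",
--     "consultar_compras": "consulta_compras",
--     "consultar_ventas_internas": "consulta_ventas_internas",
--     "buscar_documento_tecnico": "consulta_documentacion",
--     "consultar_conocimiento_tecnico": "asesoria_tecnica",
--     "radicar_reclamo": "reclamo_servicio",
--     "confirmar_pedido_y_generar_pdf": "pedido",
-- }
--
-- def _classify_return_intent(tool_calls_made: list, user_message: str, m) -> str:
--     """Scan backwards and return the intent of the last recognized tool call."""
--     for tc in reversed(tool_calls_made):
--         intent = _INTENT_BY_TOOL.get(tc["name"])
--         if intent is not None:
--             return intent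
--     return "consulta_general"
-- ===== Notes on version B (the rewrite author's own statement) =====
-- stated objective: alternative
-- what changed: Replaces the forward overwrite loop with a 9-way if/elif chain by a name-to-intent dict and a single reverse scan that returns the first (i.e. last) recognized tool call early.
import Mathlib
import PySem

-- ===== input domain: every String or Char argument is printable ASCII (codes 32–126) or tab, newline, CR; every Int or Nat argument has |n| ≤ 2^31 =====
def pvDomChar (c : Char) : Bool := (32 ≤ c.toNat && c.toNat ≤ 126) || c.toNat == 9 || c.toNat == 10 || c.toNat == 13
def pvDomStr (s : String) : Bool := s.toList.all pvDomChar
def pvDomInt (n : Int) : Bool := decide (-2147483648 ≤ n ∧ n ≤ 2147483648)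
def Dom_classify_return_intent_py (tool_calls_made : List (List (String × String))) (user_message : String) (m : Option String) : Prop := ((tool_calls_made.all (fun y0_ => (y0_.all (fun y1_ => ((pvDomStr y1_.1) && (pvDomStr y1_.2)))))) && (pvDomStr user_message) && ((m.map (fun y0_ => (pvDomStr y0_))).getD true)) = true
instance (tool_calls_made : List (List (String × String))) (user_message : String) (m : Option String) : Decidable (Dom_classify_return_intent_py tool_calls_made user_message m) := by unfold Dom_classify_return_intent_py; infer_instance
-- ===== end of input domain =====

-- B replaces A's forward overwrite loop (9-way if/elif chain) by a name→intent dict and a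
-- reverse scan returning the last recognized call's intent early; same return value on Pre_.

-- ===== PORT A =====
-- one step of A's loop body: look up tc["name"] (total via getD; Pre_ guarantees the key) and run the if/elif chain
def pvStepA (intent : String) (tc : List (String × String)) : String :=
  let name := PySem.Dict.getD (PySem.Dict.mk tc) "name" ""
  if name == "verificar_identidad" then "verificacion_identidad"
  else if name == "consultar_inventario" || name == "consultar_inventario_lote" then "consulta_productos"
  else if name == "consultar_cartera" then "consulta_cartera"
  else if name == "consultar_compras" then "consulta_compras"
  else if name == "consultar_ventas_internas" then "consulta_ventas_internas"
  else if name == "buscar_documento_tecnico" then "consulta_documentacion"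
  else if name == "consultar_conocimiento_tecnico" then "asesoria_tecnica"
  else if name == "radicar_reclamo" then "reclamo_servicio"
  else if name == "confirmar_pedido_y_generar_pdf" then "pedido"
  else intent

def classify_return_intent_py (tool_calls_made : List (List (String × String))) (user_message : String) (m : Option String) : String :=
  tool_calls_made.foldl pvStepA "consulta_general"

-- ===== PORT B =====
def pvIntentByTool : PySem.Dict String String := PySem.Dict.mk
  [ ("verificar_identidad", "verificacion_identidad")
  , ("consultar_inventario", "consulta_productos")
  , ("consultar_inventario_lote", "consulta_productos")
  , ("consultar_cartera", "consulta_cartera")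
  , ("consultar_compras", "consulta_compras")
  , ("consultar_ventas_internas", "consulta_ventas_internas")
  , ("buscar_documento_tecnico", "consulta_documentacion")
  , ("consultar_conocimiento_tecnico", "asesoria_tecnica")
  , ("radicar_reclamo", "reclamo_servicio")
  , ("confirmar_pedido_y_generar_pdf", "pedido") ]

-- the reverse loop with early return: first recognized name wins, else fall through
def pvScanB : List (List (String × String)) → String
  | [] => "consulta_general"
  | tc :: rest =>
    match pvIntentByTool.get? (PySem.Dict.getD (PySem.Dict.mk tc) "name" "") with
    | some intent => intent
    | none => pvScanB rest

def classify_return_intent_py_alt (tool_calls_made : List (List (String × String))) (user_message : String) (m : Option String) : String :=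
  pvScanB tool_calls_made.reverse

-- ===== PRECONDITION & SPEC =====
-- Pre_ excludes exactly the inputs where the Python raises KeyError: some tool call lacks the "name" key.
def Pre_classify_return_intent_py (tool_calls_made : List (List (String × String))) (user_message : String) (m : Option String) : Prop :=
  ∀ tc ∈ tool_calls_made, (PySem.Dict.mk tc).contains "name" = true
instance (tool_calls_made : List (List (String × String))) (user_message : String) (m : Option String) : Decidable (Pre_classify_return_intent_py tool_calls_made user_message m) := by unfold Pre_classify_return_intent_py; infer_instance

def pvWitness_classify_return_intent_py : (List (List (String × String))) × String × Option String :=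
  ([[("name", "consultar_cartera")], [("name", "foo")]], "hola", none)

def Spec_classify_return_intent_py (tool_calls_made : List (List (String × String))) (user_message : String) (m : Option String) (out : String) : Prop := out = classify_return_intent_py_alt tool_calls_made user_message m
instance (tool_calls_made : List (List (String × String))) (user_message : String) (m : Option String) (out : String) : Decidable (Spec_classify_return_intent_py tool_calls_made user_message m out) := by unfold Spec_classify_return_intent_py; infer_instance

-- ===== CLAIM (what is proved, stated in full; the proofs are below) =====
def Claim_equal_classify_return_intent_py : Prop := ∀ (tool_calls_made : List (List (String × String))) (user_message : String) (m : Option String), Dom_classify_return_intent_py tool_calls_made user_message m → Pre_classify_return_intent_py tool_calls_made user_message m → Spec_classify_return_intent_py tool_calls_made user_message m (classify_return_intent_py tool_calls_made user_message m)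

-- ===== LEMMAS AND PROOFS =====

-- A's if/elif chain is exactly a lookup in B's table, defaulting to the running intent
lemma pvStepA_eq_lookup (intent : String) (tc : List (String × String)) :
    pvStepA intent tc =
      (pvIntentByTool.get? (PySem.Dict.getD (PySem.Dict.mk tc) "name" "")).getD intent := by
  simp only [pvStepA]
  generalize PySem.Dict.getD (PySem.Dict.mk tc) "name" "" = name
  by_cases h1 : name = "verificar_identidad"
  · subst h1; rfl
  by_cases h2 : name = "consultar_inventario"
  · subst h2; rfl
  by_cases h3 : name = "consultar_inventario_lote"
  · subst h3; rfl
  by_cases h4 : name = "consultar_cartera"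
  · subst h4; rfl
  by_cases h5 : name = "consultar_compras"
  · subst h5; rfl
  by_cases h6 : name = "consultar_ventas_internas"
  · subst h6; rfl
  by_cases h7 : name = "buscar_documento_tecnico"
  · subst h7; rfl
  by_cases h8 : name = "consultar_conocimiento_tecnico"
  · subst h8; rfl
  by_cases h9 : name = "radicar_reclamo"
  · subst h9; rfl
  by_cases h10 : name = "confirmar_pedido_y_generar_pdf"
  · subst h10; rfl
  have e : pvIntentByTool.get? name = none := by
    simp [pvIntentByTool, PySem.Dict.get?, beq_iff_eq, Ne.symm h1, Ne.symm h2, Ne.symm h3, Ne.symm h4, Ne.symm h5, Ne.symm h6, Ne.symm h7, Ne.symm h8, Ne.symm h9, Ne.symm h10]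
  simp [e, beq_iff_eq, h1, h2, h3, h4, h5, h6, h7, h8, h9, h10]

-- first recognized intent when scanning the given (already reversed) list, as an Option
def pvFind : List (List (String × String)) → Option String
  | [] => none
  | tc :: rest =>
    match pvIntentByTool.get? (PySem.Dict.getD (PySem.Dict.mk tc) "name" "") with
    | some intent => some intent
    | none => pvFind rest

lemma pvScanB_eq_find (l : List (List (String × String))) :
    pvScanB l = (pvFind l).getD "consulta_general" := by
  induction l with
  | nil => rfl
  | cons tc rest ih =>
    simp only [pvScanB, pvFind]
    cases pvIntentByTool.get? (PySem.Dict.getD (PySem.Dict.mk tc) "name" "") <;> simp [ih]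

lemma pvFold_eq_find (tcs : List (List (String × String))) (init : String) :
    tcs.foldl pvStepA init = (pvFind tcs.reverse).getD init := by
  induction tcs using List.reverseRecOn generalizing init with
  | nil => rfl
  | append_singleton l x ih =>
    rw [List.foldl_append]
    simp only [List.foldl_cons, List.foldl_nil, List.reverse_append, List.reverse_singleton,
      List.singleton_append, pvFind, ih, pvStepA_eq_lookup]
    cases pvIntentByTool.get? (PySem.Dict.getD (PySem.Dict.mk x) "name" "") <;> simp

theorem classify_return_intent_py_spec : Claim_equal_classify_return_intent_py := by
  intro tcs um m _ _
  unfold Spec_classify_return_intent_py classify_return_intent_py classify_return_intent_py_alt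
  rw [pvFold_eq_find, pvScanB_eq_find]
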